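-- pv_equiv track=rewrite | github.com/viktor-nikolaus/advent-of-code | 2024/day_11.py | blink_list_2
-- ===== SOURCE A (Python) =====
-- def apply_rule(s):
--     if s == 0:
--         return [1]
--     s_str = str(s)
--     if len(s_str) % 2 == 0:
--         i = int(len(s_str)/2)
--         return [int(s_str[0:i]), int(s_str[i:])]
--     return [s * 2024]
--
-- def blink(stone, blinks):
--     new_stones = [stone]
--     for _ in range(blinks):
--         new_stones = [ns for s in new_stones for ns in apply_rule(s)]
--     return new_stones
--
-- def blink_list_2(stones_map, blinks):
--     result = stones_map
--     for _ in range(blinks):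
--         new_stones_map = {}
--         for s, c in result.items():
--             for ns in blink(s, 1):
--                 if ns not in new_stones_map:
--                     new_stones_map[ns] = 0
--                 new_stones_map[ns] += c
--         result = new_stones_map
--     return result
-- ===== SOURCE B (Python) =====
-- def _rule(s):
--     if s == 0:
--         return [1]
--     t = str(s)
--     n = len(t)
--     if n % 2:
--         return [s * 2024]
--     h = n // 2
--     return [int(t[:h]), int(t[h:])]
--
--
-- def _bump(cnt, pending, k, c):
--     if k not in cnt:
--         cnt[k] = 0
--         pending.append(k)
--     cnt[k] += c
--
--
-- def blink_list_2(stones_map, blinks):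
--     # One BFS pass over (stone, level) nodes: the worklist discovers each node once,
--     # counts accumulate in one table keyed by node (consumed nodes are popped);
--     # no per-blink dict rebuilding.
--     target = max(blinks, 0)
--     cnt = {}
--     pending = []
--     finals = []
--     for s, c in stones_map.items():
--         _bump(cnt, pending, (s, 0), c)
--     for s, j in pending:  # `pending` grows while being iterated: BFS over the node graph
--         if j == target:
--             finals.append(s)
--             continue
--         c = cnt.pop((s, j))
--         for ch in _rule(s):
--             _bump(cnt, pending, (ch, j + 1), c)
--     return {s: cnt[(s, target)] for s in finals}
-- ===== Notes on version B (the rewrite author's own statement) =====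
-- stated objective: alternative
-- what changed: B replaces A's per-blink reconstruction of a counts dict (an outer loop over blink levels, each rebuilding a new dict from the previous one via the blink() helper) with a single BFS worklist pass: each (stone, level) node is discovered exactly once into a growing order list, counts accumulate in one global table keyed by (stone, level), and the answer is read off the level==blinks nodes; the per-blink dict rebuild loop disappears.
-- outside the precondition, e.g. on blink_list_2({-123: 1}, 1): A returns {-1: 1, 23: 1}, B returns {-1: 1, 23: 1}
import Mathlib
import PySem

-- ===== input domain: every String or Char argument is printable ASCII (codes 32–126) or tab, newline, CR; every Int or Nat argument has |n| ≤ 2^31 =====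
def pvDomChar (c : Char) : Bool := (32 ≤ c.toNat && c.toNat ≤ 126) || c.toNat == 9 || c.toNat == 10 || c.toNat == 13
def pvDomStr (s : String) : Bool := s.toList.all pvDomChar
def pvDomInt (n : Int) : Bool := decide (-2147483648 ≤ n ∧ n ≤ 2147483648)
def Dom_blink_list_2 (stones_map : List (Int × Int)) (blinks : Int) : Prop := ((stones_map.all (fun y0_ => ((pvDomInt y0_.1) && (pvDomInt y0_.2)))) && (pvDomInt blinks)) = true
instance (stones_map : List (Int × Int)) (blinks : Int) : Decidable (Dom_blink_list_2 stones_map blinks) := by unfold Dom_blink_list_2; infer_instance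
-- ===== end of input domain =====

-- B replaces A's per-blink dict rebuilding (an outer loop over blink levels, each level rebuilt from the
-- previous one via the blink() helper) with ONE worklist/BFS pass over (stone, level) nodes: each node is
-- discovered once into a growing order list and counts accumulate in a single global table; objective:
-- alternative algorithm structure, same asymptotic cost.

-- ===== PORT A =====
def pyApplyRule (s : Int) : List Int :=
  if s = 0 then [1]
  else
    let s_str := PySem.Int.toStr s
    if PySem.Int.mod (PySem.Str.len s_str) 2 == 0 then
      let i := PySem.Int.truncdiv (PySem.Str.len s_str) 2
      -- int() raises ValueError on a bare '-' (single-digit negative stone); that happens only outside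
      -- Pre_blink_list_2, where the none is defaulted to 0
      [(PySem.Int.ofStr? (PySem.Str.slice s_str (some 0) (some i))).getD 0,
       (PySem.Int.ofStr? (PySem.Str.slice s_str (some i) none)).getD 0]
    else [s * 2024]

def pyBlink (stone : Int) (blinks : Int) : List Int :=
  (PySem.List.pyRange 0 blinks 1).foldl
    (fun new_stones _ => new_stones.flatMap pyApplyRule) [stone]

def blink_list_2 (stones_map : List (Int × Int)) (blinks : Int) : List (Int × Int) :=
  ((PySem.List.pyRange 0 blinks 1).foldl
      (fun (result : PySem.Dict Int Int) _ =>
        result.items.foldl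
          (fun new_stones_map p =>
            (pyBlink p.1 1).foldl
              (fun m ns =>
                let m1 := if m.contains ns then m else m.insert ns 0
                m1.insert ns (m1.getD ns 0 + p.2))
              new_stones_map)
          PySem.Dict.empty)
      (PySem.Dict.mk stones_map)).items

-- ===== PORT B =====
def altRule (s : Int) : List Int :=
  if s = 0 then [1]
  else
    let t := PySem.Int.toStr s
    let n := PySem.Str.len t
    if PySem.Int.mod n 2 != 0 then [s * 2024]
    else
      let h := PySem.Int.floordiv n 2
      -- same ValueError corner as in A's port: outside Pre_blink_list_2 the none is defaulted to 0
      [(PySem.Int.ofStr? (PySem.Str.slice t none (some h))).getD 0,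
       (PySem.Int.ofStr? (PySem.Str.slice t (some h) none)).getD 0]

-- Source B's _bump helper: zero-init a missing node, record its discovery, add c
def altBump (st : PySem.Dict (Int × Int) Int × List (Int × Int)) (k : Int × Int) (c : Int) :
    PySem.Dict (Int × Int) Int × List (Int × Int) :=
  let cnt1 := if st.1.contains k then st.1 else st.1.insert k 0
  (cnt1.insert k (cnt1.getD k 0 + c),
   if st.1.contains k then st.2 else st.2 ++ [k])

-- the `for s, j in pending:` worklist loop of Source B: `pending` grows at the tail while its head is
-- consumed; `finals` collects the stones that reached the target level, in discovery order. The fuel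
-- argument only makes the recursion total and is proved sufficient below (each node enters `pending` once).
def altLoop (target : Int) : Nat → PySem.Dict (Int × Int) Int → List (Int × Int) → List Int →
    PySem.Dict (Int × Int) Int × List Int
  | 0, cnt, _, finals => (cnt, finals)
  | fuel + 1, cnt, pending, finals =>
    match pending with
    | [] => (cnt, finals)
    | sj :: rest =>
      if sj.2 == target then altLoop target fuel cnt rest (finals ++ [sj.1])
      else
        -- cnt.pop((s, j)): the key is always present here, so the getD default is never read
        let c := cnt.getD sj 0
        let cnt1 := cnt.erase sj
        let st := (altRule sj.1).foldl (fun st ch => altBump st (ch, sj.2 + 1) c) (cnt1, rest)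
        altLoop target fuel st.1 st.2 finals

def blink_list_2_alt (stones_map : List (Int × Int)) (blinks : Int) : List (Int × Int) :=
  let target := max blinks 0
  let init := stones_map.foldl (fun st p => altBump st (p.1, 0) p.2)
    (PySem.Dict.empty, ([] : List (Int × Int)))
  let fin := altLoop target (stones_map.length * 2 ^ (target.toNat + 1) + 1) init.1 init.2 []
  (PySem.Dict.mk (fin.2.map (fun s => (s, fin.1.getD (s, target) 0)))).items

-- ===== PRECONDITION & SPEC =====
-- Pre_ excludes association lists with duplicate keys (not a valid Python dict), and, when blinks ≥ 1, any
-- negative stone value: blinking a negative stone can reach a single-digit negative, on which A's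
-- int(str(s)[0:1]) = int('-') raises ValueError; the exact raising set is not closed-form (it would need the
-- simulation itself), so all negative stones are excluded, including some on which A does return.
def Pre_blink_list_2 (stones_map : List (Int × Int)) (blinks : Int) : Prop :=
  (stones_map.map Prod.fst).Nodup ∧ (1 ≤ blinks → ∀ p ∈ stones_map, 0 ≤ p.1)
instance (stones_map : List (Int × Int)) (blinks : Int) : Decidable (Pre_blink_list_2 stones_map blinks) := by unfold Pre_blink_list_2; infer_instance

def pvWitness_blink_list_2 : (List (Int × Int)) × Int := ([(125, 1), (17, 1)], 3)

def Spec_blink_list_2 (stones_map : List (Int × Int)) (blinks : Int) (out : List (Int × Int)) : Prop := out = blink_list_2_alt stones_map blinks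
instance (stones_map : List (Int × Int)) (blinks : Int) (out : List (Int × Int)) : Decidable (Spec_blink_list_2 stones_map blinks out) := by unfold Spec_blink_list_2; infer_instance

-- ===== CLAIM (what is proved, stated in full; the proofs are below) =====
def Claim_equal_blink_list_2 : Prop := ∀ (stones_map : List (Int × Int)) (blinks : Int), Dom_blink_list_2 stones_map blinks → Pre_blink_list_2 stones_map blinks → Spec_blink_list_2 stones_map blinks (blink_list_2 stones_map blinks)

-- ===== LEMMAS AND PROOFS =====

-- one step of Source B's accumulation, generalised to a weighted pair (stone, weight) tagged with level j1
def gstep (j1 : Int) (st : PySem.Dict (Int × Int) Int × List (Int × Int)) (p : Int × Int) :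
    PySem.Dict (Int × Int) Int × List (Int × Int) :=
  altBump st (p.1, j1) p.2

-- the untagged reference accumulation over one level
def insAdd (e : PySem.Dict Int Int) (p : Int × Int) : PySem.Dict Int Int :=
  e.insert p.1 (e.getD p.1 0 + p.2)

def blockF (e : PySem.Dict Int Int) (its : List (Int × Int)) : PySem.Dict Int Int :=
  its.foldl (fun e q => ((altRule q.1).map (fun ch => (ch, q.2))).foldl insAdd e) e

def dstep (d : PySem.Dict Int Int) : PySem.Dict Int Int := blockF PySem.Dict.empty d.items

def dIter : Nat → PySem.Dict Int Int → PySem.Dict Int Int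
  | 0, d => d
  | r + 1, d => dIter r (dstep d)

def remN : Nat → PySem.Dict Int Int → Nat
  | 0, d => d.items.length
  | r + 1, d => d.items.length + remN r (dstep d)

theorem rule_eq (s : Int) : pyApplyRule s = altRule s := by
  unfold pyApplyRule altRule
  by_cases h0 : s = 0
  · simp [h0]
  · have hsl : ∀ (t : String) (i : Int),
        PySem.Str.slice t (some 0) (some i) = PySem.Str.slice t none (some i) := by
      intro t i
      simp [PySem.Str.slice, PySem.Chars.slice_eq_listSlice, PySem.List.slice_zero_start]
    simp [h0, hsl]
    generalize (PySem.Int.toChars s).length = L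
    have htd : PySem.Int.truncdiv ((L : Int)) 2 = (L : Int) / 2 := by
      simp [PySem.Int.truncdiv]
    rw [htd]
    by_cases hd : (2:Int) ∣ (L : Int)
    · rw [if_pos hd, if_neg (by omega)]
    · rw [if_neg hd, if_pos (by omega)]

theorem blink_one (s : Int) : pyBlink s 1 = pyApplyRule s := by
  unfold pyBlink
  have h : PySem.List.pyRange 0 1 1 = [0] := by decide
  simp [h]

theorem upd_eq (m : PySem.Dict Int Int) (ns c : Int) :
    (if m.contains ns then m else m.insert ns 0).insert ns
      ((if m.contains ns then m else m.insert ns 0).getD ns 0 + c)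
    = m.insert ns (m.getD ns 0 + c) := by
  by_cases h : m.contains ns
  · simp [h]
  · simp only [h, Bool.false_eq_true, ite_false]
    rw [PySem.Dict.getD_insert_self, PySem.Dict.insert_insert_self,
        PySem.Dict.getD_of_not_contains m 0 (by simpa using h)]

-- A's one level (the body of A's outer blink loop) is exactly dstep
theorem stepA_eq (d : PySem.Dict Int Int) :
    d.items.foldl
      (fun new_stones_map p =>
        (pyBlink p.1 1).foldl
          (fun m ns =>
            let m1 := if m.contains ns then m else m.insert ns 0
            m1.insert ns (m1.getD ns 0 + p.2))
          new_stones_map)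
      PySem.Dict.empty = dstep d := by
  unfold dstep blockF
  refine PySem.List.foldl_congr_mem _ _ _ _ ?_
  intro nm p _
  rw [blink_one, rule_eq, List.foldl_map]
  exact PySem.List.foldl_congr_mem _ _ _ _ (fun m ns _ => upd_eq m ns p.2)

theorem loop_eq (l : List Int) (d : PySem.Dict Int Int) :
    l.foldl (fun r (_ : Int) => dstep r) d = dIter l.length d := by
  induction l generalizing d with
  | nil => rfl
  | cons x xs ih => simpa [dIter] using ih (dstep d)

theorem a_side (stones_map : List (Int × Int)) (blinks : Int) :
    blink_list_2 stones_map blinks = (dIter blinks.toNat (PySem.Dict.mk stones_map)).items := by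
  unfold blink_list_2
  have hfun : (fun (result : PySem.Dict Int Int) (_ : Int) =>
      result.items.foldl
        (fun new_stones_map p =>
          (pyBlink p.1 1).foldl
            (fun m ns =>
              let m1 := if m.contains ns then m else m.insert ns 0
              m1.insert ns (m1.getD ns 0 + p.2))
            new_stones_map)
        PySem.Dict.empty) = fun r _ => dstep r :=
    funext fun r => funext fun _ => stepA_eq r
  rw [hfun, loop_eq]
  simp [PySem.List.length_pyRange_one]

-- ===== simulation of Source B's worklist =====

-- folding weighted pairs tagged with level j1 into the global table simulates the untagged fold insAdd,
-- appends exactly the new keys to the order list, and touches no other level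
theorem pairs_sim (j1 : Int) (ps : List (Int × Int)) :
    ∀ (cnt : PySem.Dict (Int × Int) Int) (order : List (Int × Int)) (e : PySem.Dict Int Int),
    (∀ k : Int, cnt.contains (k, j1) = e.contains k) →
    (∀ k : Int, cnt.getD (k, j1) 0 = e.getD k 0) →
    ∃ (Δ : List Int) (cnt' : PySem.Dict (Int × Int) Int),
      ps.foldl (gstep j1) (cnt, order) = (cnt', order ++ Δ.map (fun k => (k, j1)))
      ∧ (ps.foldl insAdd e).keys = e.keys ++ Δ
      ∧ (∀ k : Int, cnt'.contains (k, j1) = (ps.foldl insAdd e).contains k)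
      ∧ (∀ k : Int, cnt'.getD (k, j1) 0 = (ps.foldl insAdd e).getD k 0)
      ∧ (∀ q : Int × Int, q.2 ≠ j1 → cnt'.getD q 0 = cnt.getD q 0 ∧ cnt'.contains q = cnt.contains q) := by
  induction ps with
  | nil =>
    intro cnt order e hc hg
    exact ⟨[], cnt, by simp, by simp, hc, hg, fun q _ => ⟨rfl, rfl⟩⟩
  | cons p t ih =>
    intro cnt order e hc hg
    by_cases hcp : e.contains p.1
    · -- key already present: no append, add in place
      have hcc : cnt.contains (p.1, j1) = true := by rw [hc]; exact hcp
      have hstep : gstep j1 (cnt, order) p = (cnt.insert (p.1, j1) (cnt.getD (p.1, j1) 0 + p.2), order) := by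
        simp [gstep, altBump, hcc]
      have hins : insAdd e p = e.insert p.1 (e.getD p.1 0 + p.2) := rfl
      have hc' : ∀ k : Int, (cnt.insert (p.1, j1) (cnt.getD (p.1, j1) 0 + p.2)).contains (k, j1)
          = (insAdd e p).contains k := by
        intro k
        rw [hins, PySem.Dict.contains_insert, PySem.Dict.contains_insert, hc]
        have : (((k, j1) : Int × Int) == (p.1, j1)) = (k == p.1) := by
          simp [Prod.ext_iff]
        rw [this]
      have hg' : ∀ k : Int, (cnt.insert (p.1, j1) (cnt.getD (p.1, j1) 0 + p.2)).getD (k, j1) 0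
          = (insAdd e p).getD k 0 := by
        intro k
        rw [hins, PySem.Dict.getD_insert, PySem.Dict.getD_insert]
        by_cases hk : k = p.1
        · simp [hk, hg]
        · simp [hk, Prod.ext_iff, hg]
      obtain ⟨Δ, cnt', h1, h2, h3, h4, h5⟩ := ih _ order _ hc' hg'
      refine ⟨Δ, cnt', ?_, ?_, h3, h4, ?_⟩
      · simpa [hstep] using h1
      · have : (insAdd e p).keys = e.keys := by
          rw [hins]; exact PySem.Dict.keys_insert_of_contains e _ hcp
        simpa [this] using h2
      · intro q hq
        obtain ⟨hg5, hc5⟩ := h5 q hq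
        constructor
        · rw [hg5, PySem.Dict.getD_insert]
          have : ¬ q = (p.1, j1) := by
            intro h; apply hq; rw [h]
          simp [this]
        · rw [hc5, PySem.Dict.contains_insert]
          have : (q == ((p.1, j1) : Int × Int)) = false := by
            have : ¬ q = (p.1, j1) := by intro h; apply hq; rw [h]
            simpa using this
          simp [this]
    · -- new key: zero-init, append to order, then add
      have hcc : cnt.contains (p.1, j1) = false := by rw [hc]; simpa using hcp
      have hstep : gstep j1 (cnt, order) p
          = (cnt.insert (p.1, j1) (0 + p.2), order ++ [(p.1, j1)]) := by
        simp only [gstep, altBump, hcc, Bool.false_eq_true, ite_false]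
        rw [PySem.Dict.getD_insert_self, PySem.Dict.insert_insert_self]
      have hins : insAdd e p = e.insert p.1 (0 + p.2) := by
        unfold insAdd
        rw [PySem.Dict.getD_of_not_contains e 0 (by simpa using hcp)]
      have hc' : ∀ k : Int, (cnt.insert (p.1, j1) (0 + p.2)).contains (k, j1)
          = (insAdd e p).contains k := by
        intro k
        rw [hins, PySem.Dict.contains_insert, PySem.Dict.contains_insert, hc]
        have : (((k, j1) : Int × Int) == (p.1, j1)) = (k == p.1) := by simp [Prod.ext_iff]
        rw [this]
      have hg' : ∀ k : Int, (cnt.insert (p.1, j1) (0 + p.2)).getD (k, j1) 0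
          = (insAdd e p).getD k 0 := by
        intro k
        rw [hins, PySem.Dict.getD_insert, PySem.Dict.getD_insert]
        by_cases hk : k = p.1
        · simp [hk]
        · simp [hk, Prod.ext_iff, hg]
      obtain ⟨Δ, cnt', h1, h2, h3, h4, h5⟩ := ih _ (order ++ [(p.1, j1)]) _ hc' hg'
      refine ⟨p.1 :: Δ, cnt', ?_, ?_, h3, h4, ?_⟩
      · rw [List.foldl_cons, hstep, h1]; simp
      · have hk : (insAdd e p).keys = e.keys ++ [p.1] := by
          rw [hins]; exact PySem.Dict.keys_insert_of_not_contains e _ (by simpa using hcp)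
        rw [List.foldl_cons, h2, hk]; simp
      · intro q hq
        obtain ⟨hg5, hc5⟩ := h5 q hq
        have hne : ¬ q = (p.1, j1) := by intro h; apply hq; rw [h]
        constructor
        · rw [hg5, PySem.Dict.getD_insert]; simp [hne]
        · rw [hc5, PySem.Dict.contains_insert]
          have : (q == ((p.1, j1) : Int × Int)) = false := by simpa using hne
          simp [this]

theorem pvFind?_filter_ne {κ ν : Type} [BEq κ] [LawfulBEq κ] (l : List (κ × ν)) (k k' : κ)
    (hne : k' ≠ k) :
    (l.filter (fun p => !(p.1 == k))).find? (fun p => p.1 == k') = l.find? (fun p => p.1 == k') := by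
  induction l with
  | nil => rfl
  | cons p t ih =>
    by_cases h : (p.1 == k') = true
    · have hpk : p.1 = k' := by simpa using h
      have hkeep : (!(p.1 == k)) = true := by
        have : (p.1 == k) = false := by
          rw [hpk]
          simpa using hne
        simp [this]
      simp [hkeep, h]
    · by_cases hk : (p.1 == k) = true
      · simp [hk, h, ih]
      · simp [hk, h, ih]

theorem pvGetD_erase_of_ne {κ ν : Type} [BEq κ] [LawfulBEq κ] (d : PySem.Dict κ ν) (k k' : κ)
    (hne : k' ≠ k) (d0 : ν) : (d.erase k).getD k' d0 = d.getD k' d0 := by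
  simp only [PySem.Dict.getD, PySem.Dict.get?, PySem.Dict.erase]
  rw [pvFind?_filter_ne _ _ _ hne]

theorem pvAny_filter_ne {κ ν : Type} [BEq κ] [LawfulBEq κ] (l : List (κ × ν)) (k k' : κ)
    (hne : k' ≠ k) :
    (l.filter (fun p => !(p.1 == k))).any (fun p => p.1 == k') = l.any (fun p => p.1 == k') := by
  induction l with
  | nil => rfl
  | cons p t ih =>
    by_cases h : (p.1 == k') = true
    · have hpk : p.1 = k' := by simpa using h
      have hkeep : (!(p.1 == k)) = true := by
        have : (p.1 == k) = false := by
          rw [hpk]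
          simpa using hne
        simp [this]
      simp [hkeep, h]
    · by_cases hk : (p.1 == k) = true
      · simp [hk, h, ih]
      · simp [hk, h, ih]

theorem pvContains_erase_of_ne {κ ν : Type} [BEq κ] [LawfulBEq κ] (d : PySem.Dict κ ν) (k k' : κ)
    (hne : k' ≠ k) : (d.erase k).contains k' = d.contains k' := by
  simp only [PySem.Dict.contains, PySem.Dict.erase]
  exact pvAny_filter_ne _ _ _ hne

theorem skip_run (target : Int) (suff : List (Int × Int)) :
    ∀ (finals : List Int) (cnt : PySem.Dict (Int × Int) Int) (fuel : Nat),
    (∀ p ∈ suff, p.2 = target) →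
    altLoop target (suff.length + fuel) cnt suff finals = (cnt, finals ++ suff.map (fun p => p.1)) := by
  induction suff with
  | nil =>
    intro finals cnt fuel _
    cases fuel with
    | zero => simp [altLoop]
    | succ f => simp [altLoop]
  | cons p t ih =>
    intro finals cnt fuel h
    have hbeq : (p.2 == target) = true := by
      simp [h p (List.mem_cons_self ..)]
    have hlen : (p :: t).length + fuel = (t.length + fuel) + 1 := by
      simp [List.length_cons]; omega
    rw [hlen]
    simp only [altLoop, hbeq, if_true]
    rw [ih (finals ++ [p.1]) cnt fuel (fun q hq => h q (List.mem_cons_of_mem _ hq))]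
    simp

-- processing one whole level block of the worklist
theorem block_run (target t1 : Int) (hne : t1 ≠ target) (its : List (Int × Int)) :
    ∀ (cnt : PySem.Dict (Int × Int) Int) (e : PySem.Dict Int Int)
      (post : List (Int × Int)) (finals : List Int) (fuel : Nat),
    (its.map Prod.fst).Nodup →
    (∀ p ∈ its, cnt.getD (p.1, t1) 0 = p.2) →
    (∀ k : Int, cnt.contains (k, t1 + 1) = e.contains k) →
    (∀ k : Int, cnt.getD (k, t1 + 1) 0 = e.getD k 0) →
    ∃ (cnt' : PySem.Dict (Int × Int) Int) (Δ : List Int),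
      altLoop target (its.length + fuel) cnt (its.map (fun p => (p.1, t1)) ++ post) finals
        = altLoop target fuel cnt' (post ++ Δ.map (fun k => (k, t1 + 1))) finals
      ∧ (blockF e its).keys = e.keys ++ Δ
      ∧ (∀ k : Int, cnt'.contains (k, t1 + 1) = (blockF e its).contains k)
      ∧ (∀ k : Int, cnt'.getD (k, t1 + 1) 0 = (blockF e its).getD k 0)
      ∧ (∀ q : Int × Int, q.2 ≠ t1 + 1 → q.2 ≠ t1 →
          cnt'.getD q 0 = cnt.getD q 0 ∧ cnt'.contains q = cnt.contains q) := by
  induction its with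
  | nil =>
    intro cnt e post finals fuel _ _ hc hg
    exact ⟨cnt, [], by simp, by simp [blockF], hc, hg, fun q _ _ => ⟨rfl, rfl⟩⟩
  | cons p t ih =>
    intro cnt e post finals fuel hndits hvals hc hg
    have hndh : p.1 ∉ t.map Prod.fst := by
      rw [List.map_cons] at hndits
      exact (List.nodup_cons.mp hndits).1
    have hndt : (t.map Prod.fst).Nodup := by
      rw [List.map_cons] at hndits
      exact (List.nodup_cons.mp hndits).2
    have hlen : (p :: t).length + fuel = (t.length + fuel) + 1 := by
      simp [List.length_cons]; omega
    have hbeq : ((t1 : Int) == target) = false := by simpa using hne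
    have hcval : cnt.getD (p.1, t1) 0 = p.2 := hvals p (List.mem_cons_self ..)
    -- the popped node: cnt.erase
    have hcE : ∀ k : Int, (cnt.erase (p.1, t1)).contains (k, t1 + 1) = e.contains k := by
      intro k
      rw [pvContains_erase_of_ne _ _ _ (by intro hx; simp [Prod.ext_iff] at hx)]
      exact hc k
    have hgE : ∀ k : Int, (cnt.erase (p.1, t1)).getD (k, t1 + 1) 0 = e.getD k 0 := by
      intro k
      rw [pvGetD_erase_of_ne _ _ _ (by intro hx; simp [Prod.ext_iff] at hx)]
      exact hg k
    -- the inner fold over the rule children is a gstep fold over weighted pairs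
    have hinner : ∀ (st : PySem.Dict (Int × Int) Int × List (Int × Int)),
        (altRule p.1).foldl (fun st ch => altBump st (ch, t1 + 1) p.2) st
        = ((altRule p.1).map (fun ch => (ch, p.2))).foldl (gstep (t1 + 1)) st := by
      intro st
      rw [List.foldl_map]
      rfl
    obtain ⟨Δ₀, cnt₁, e1, e2, e3, e4, e5⟩ :=
      pairs_sim (t1 + 1) ((altRule p.1).map (fun ch => (ch, p.2))) (cnt.erase (p.1, t1))
        (t.map (fun p => (p.1, t1)) ++ post) e hcE hgE
    -- one loop step
    have hstep : altLoop target ((t.length + fuel) + 1) cnt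
        ((p.1, t1) :: (t.map (fun p => (p.1, t1)) ++ post)) finals
        = altLoop target (t.length + fuel) cnt₁
            ((t.map (fun p => (p.1, t1)) ++ post) ++ Δ₀.map (fun k => (k, t1 + 1))) finals := by
      simp only [altLoop, hbeq, Bool.false_eq_true, if_false]
      rw [hcval, hinner, e1]
    have hvals' : ∀ q ∈ t, cnt₁.getD (q.1, t1) 0 = q.2 := by
      intro q hq
      have h1 := (e5 (q.1, t1) (by intro h; simp at h)).1
      rw [h1, pvGetD_erase_of_ne _ _ _ (by
        intro hx
        have hx1 : q.1 = p.1 := (Prod.mk.injEq _ _ _ _ ▸ hx).1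
        exact hndh (hx1 ▸ (List.mem_map_of_mem (f := Prod.fst) hq)))]
      exact hvals q (List.mem_cons_of_mem _ hq)
    obtain ⟨cnt', Δ₁, f1, f2, f3, f4, f5⟩ :=
      ih cnt₁ (((altRule p.1).map (fun ch => (ch, p.2))).foldl insAdd e)
        (post ++ Δ₀.map (fun k => (k, t1 + 1))) finals fuel hndt hvals' e3 e4
    refine ⟨cnt', Δ₀ ++ Δ₁, ?_, ?_, ?_, ?_, ?_⟩
    · have hco : (p :: t).map (fun p => (p.1, t1)) ++ post
          = (p.1, t1) :: (t.map (fun p => (p.1, t1)) ++ post) := by simp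
      rw [hco, hlen, hstep]
      have hsh : (t.map (fun p => (p.1, t1)) ++ post) ++ Δ₀.map (fun k => (k, t1 + 1))
          = t.map (fun p => (p.1, t1)) ++ (post ++ Δ₀.map (fun k => (k, t1 + 1))) := by simp
      rw [hsh, f1]
      congr 1
      simp
    · have hbf : blockF e (p :: t)
          = blockF (((altRule p.1).map (fun ch => (ch, p.2))).foldl insAdd e) t := rfl
      rw [hbf, f2, e2]
      simp
    · intro k
      have hbf : blockF e (p :: t)
          = blockF (((altRule p.1).map (fun ch => (ch, p.2))).foldl insAdd e) t := rfl
      rw [hbf]; exact f3 k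
    · intro k
      have hbf : blockF e (p :: t)
          = blockF (((altRule p.1).map (fun ch => (ch, p.2))).foldl insAdd e) t := rfl
      rw [hbf]; exact f4 k
    · intro q hq1 hq2
      obtain ⟨g1, g2⟩ := f5 q hq1 hq2
      obtain ⟨g3, g4⟩ := e5 q hq1
      have hqe : ¬ q = (p.1, t1) := by
        intro h; apply hq2; rw [h]
      constructor
      · rw [g1, g3, pvGetD_erase_of_ne _ _ _ hqe]
      · rw [g2, g4, pvContains_erase_of_ne _ _ _ hqe]

theorem blockF_nodup : ∀ (its : List (Int × Int)) (e : PySem.Dict Int Int),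
    e.keys.Nodup → (blockF e its).keys.Nodup := by
  intro its
  induction its with
  | nil => intro e h; exact h
  | cons p t ih =>
    intro e h
    have : blockF e (p :: t) = blockF (((altRule p.1).map (fun ch => (ch, p.2))).foldl insAdd e) t := rfl
    rw [this]
    apply ih
    exact PySem.Dict.nodup_keys_foldl_insert_key _ Prod.fst (fun d q => d.getD q.1 0 + q.2) e h

theorem dstep_nodup (d : PySem.Dict Int Int) : (dstep d).keys.Nodup := by
  unfold dstep
  exact blockF_nodup d.items PySem.Dict.empty (by simp [PySem.Dict.keys_empty])

theorem dIter_nodup (r : Nat) : ∀ d : PySem.Dict Int Int, d.keys.Nodup → (dIter r d).keys.Nodup := by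
  induction r with
  | zero => intro d h; exact h
  | succ r ih => intro d _; exact ih (dstep d) (dstep_nodup d)

theorem altRule_len (s : Int) : (altRule s).length ≤ 2 := by
  by_cases h0 : s = 0
  · simp [altRule, h0]
  · simp [altRule, h0]
    split <;> simp

theorem keys_blockF_le : ∀ (its : List (Int × Int)) (e : PySem.Dict Int Int),
    (blockF e its).keys.length ≤ e.keys.length + 2 * its.length := by
  intro its
  induction its with
  | nil => intro e; simp [blockF]
  | cons p t ih =>
    intro e
    have h1 : blockF e (p :: t) = blockF (((altRule p.1).map (fun ch => (ch, p.2))).foldl insAdd e) t := rfl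
    have h2 : (((altRule p.1).map (fun ch => (ch, p.2))).foldl insAdd e).keys.length
        ≤ e.keys.length + 2 := by
      have hk : (((altRule p.1).map (fun ch => (ch, p.2))).foldl insAdd e).keys
          = PySem.Set.update e.keys (((altRule p.1).map (fun ch => (ch, p.2))).map Prod.fst) := by
        exact PySem.Dict.keys_foldl_insert_key _ Prod.fst (fun d q => d.getD q.1 0 + q.2) e
      rw [hk, PySem.Set.update_eq_append_filter]
      have hle1 : ((PySem.Set.ofList (((altRule p.1).map (fun ch => (ch, p.2))).map Prod.fst)).filter
          (fun y => !(PySem.Set.contains e.keys y))).length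
          ≤ (altRule p.1).length := by
        calc _ ≤ (PySem.Set.ofList (((altRule p.1).map (fun ch => (ch, p.2))).map Prod.fst)).length :=
              List.length_filter_le _ _
          _ ≤ (((altRule p.1).map (fun ch => (ch, p.2))).map Prod.fst).length :=
              PySem.Set.length_ofList_le _
          _ = (altRule p.1).length := by simp
      have := altRule_len p.1
      simp only [List.length_append]
      omega
    calc (blockF e (p :: t)).keys.length
        ≤ (((altRule p.1).map (fun ch => (ch, p.2))).foldl insAdd e).keys.length + 2 * t.length := by
          rw [h1]; exact ih _
      _ ≤ e.keys.length + 2 * (p :: t).length := by simp [List.length_cons]; omega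

theorem items_len_eq_keys (d : PySem.Dict Int Int) : d.items.length = d.keys.length := by
  simp [PySem.Dict.keys]

theorem remN_le : ∀ (r : Nat) (d : PySem.Dict Int Int), remN r d ≤ d.items.length * (2 ^ (r + 1) - 1) := by
  intro r
  induction r with
  | zero => intro d; simp [remN]
  | succ r ih =>
    intro d
    have h1 : (dstep d).items.length ≤ 2 * d.items.length := by
      rw [items_len_eq_keys]
      unfold dstep
      have := keys_blockF_le d.items PySem.Dict.empty
      simpa [PySem.Dict.keys_empty] using this
    have h2 := ih (dstep d)
    have h3 : remN (r + 1) d = d.items.length + remN r (dstep d) := rfl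
    rw [h3]
    obtain ⟨q, hq⟩ : ∃ q, 2 ^ (r + 1) = q + 1 :=
      ⟨2 ^ (r + 1) - 1, by have : (1 : Nat) ≤ 2 ^ (r + 1) := Nat.one_le_two_pow; omega⟩
    rw [hq] at h2
    have hq2 : 2 ^ (r + 1 + 1) = 2 * q + 2 := by rw [pow_succ, hq]; ring
    rw [hq2]
    have h4 : remN r (dstep d) ≤ 2 * d.items.length * q := by
      calc remN r (dstep d) ≤ (dstep d).items.length * (q + 1 - 1) := h2
        _ = (dstep d).items.length * q := by simp
        _ ≤ 2 * d.items.length * q := Nat.mul_le_mul_right q h1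
    have h5 : d.items.length * (2 * q + 2 - 1) = 2 * d.items.length * q + d.items.length := by
      have : 2 * q + 2 - 1 = 2 * q + 1 := by omega
      rw [this]; ring
    rw [h5]
    omega
  
-- running the worklist through all remaining levels
theorem levels_run (target : Int) : ∀ (r : Nat) (t1 : Int) (d : PySem.Dict Int Int)
    (cnt : PySem.Dict (Int × Int) Int) (finals : List Int) (fuel : Nat),
    t1 + (r : Int) = target →
    (∀ k : Int, cnt.getD (k, t1) 0 = d.getD k 0) →
    (∀ (k : Int) (j : Int), t1 < j → cnt.contains (k, j) = false) →
    d.keys.Nodup →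
    ∃ cnt' : PySem.Dict (Int × Int) Int,
      altLoop target (remN r d + fuel) cnt (d.items.map (fun p => (p.1, t1))) finals
        = (cnt', finals ++ (dIter r d).items.map (fun p => p.1))
      ∧ ∀ k : Int, cnt'.getD (k, target) 0 = (dIter r d).getD k 0 := by
  intro r
  induction r with
  | zero =>
    intro t1 d cnt finals fuel ht hvals _ _
    have ht0 : t1 = target := by simpa using ht
    refine ⟨cnt, ?_, ?_⟩
    · have hlen : remN 0 d = (d.items.map (fun p => (p.1, t1))).length := by
        simp [remN]
      rw [hlen]
      rw [skip_run target _ finals cnt fuel (by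
        intro p hp
        simp at hp
        obtain ⟨q, _, hq⟩ := hp
        rw [← hq, ht0])]
      have : dIter 0 d = d := rfl
      rw [this]
      simp [List.map_map]
    · intro k; rw [← ht0]; exact hvals k
  | succ r ih =>
    intro t1 d cnt finals fuel ht hvals hfresh hnd
    have hne : t1 ≠ target := by
      intro h; rw [h] at ht; omega
    have hndits : (d.items.map Prod.fst).Nodup := by
      simpa [PySem.Dict.keys] using hnd
    have hits : ∀ p ∈ d.items, cnt.getD (p.1, t1) 0 = p.2 := by
      intro p hp
      rw [hvals p.1]
      exact PySem.Dict.getD_of_mem_items d (by simpa using hp) hnd 0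
    have hc0 : ∀ k : Int, cnt.contains (k, t1 + 1) = (PySem.Dict.empty : PySem.Dict Int Int).contains k := by
      intro k
      rw [hfresh k (t1 + 1) (by omega)]
      simp
    have hg0 : ∀ k : Int, cnt.getD (k, t1 + 1) 0 = (PySem.Dict.empty : PySem.Dict Int Int).getD k 0 := by
      intro k
      rw [PySem.Dict.getD_of_not_contains cnt 0 (hfresh k (t1 + 1) (by omega))]
      simp
    obtain ⟨cnt₁, Δ, b1, b2, b3, b4, b5⟩ :=
      block_run target t1 hne d.items cnt (PySem.Dict.empty : PySem.Dict Int Int) [] finals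
        (remN r (dstep d) + fuel) hndits hits hc0 hg0
    have hΔ : Δ = (dstep d).keys := by
      have h2 : (dstep d).keys = (PySem.Dict.empty : PySem.Dict Int Int).keys ++ Δ := b2
      simpa [PySem.Dict.keys_empty] using h2.symm
    have hΔmap : Δ.map (fun k => (k, t1 + 1)) = (dstep d).items.map (fun p => (p.1, t1 + 1)) := by
      rw [hΔ]
      simp [PySem.Dict.keys, List.map_map]
    have hvals₁ : ∀ k : Int, cnt₁.getD (k, t1 + 1) 0 = (dstep d).getD k 0 := b4
    have hfresh₁ : ∀ (k : Int) (j : Int), t1 + 1 < j → cnt₁.contains (k, j) = false := by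
      intro k j hj
      have h2 := (b5 (k, j) (by intro h; simp at h; omega) (by intro h; simp at h; omega)).2
      rw [h2]
      exact hfresh k j (by omega)
    obtain ⟨cnt', c1, c2⟩ := ih (t1 + 1) (dstep d) cnt₁ finals fuel
      (by omega) hvals₁ hfresh₁ (dstep_nodup d)
    refine ⟨cnt', ?_, c2⟩
    have hrem : remN (r + 1) d + fuel = d.items.length + (remN r (dstep d) + fuel) := by
      simp [remN]; omega
    rw [hrem]
    simp only [List.append_nil, List.nil_append] at b1
    rw [b1, hΔmap, c1]
    have hiter : dIter (r + 1) d = dIter r (dstep d) := rfl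
    rw [hiter]

-- the initial accumulation over the stones map, versus the starting dict
theorem init_getD : ∀ (m : List (Int × Int)) (e : PySem.Dict Int Int),
    (m.map Prod.fst).Nodup →
    (∀ p ∈ m, e.contains p.1 = false) →
    ∀ k : Int, (m.foldl insAdd e).getD k 0
      = if (PySem.Dict.mk m).contains k then (PySem.Dict.mk m).getD k 0 else e.getD k 0 := by
  intro m
  induction m with
  | nil =>
    intro e _ _ k
    simp [PySem.Dict.contains_mk]
  | cons p t ih =>
    intro e hnd hfresh k
    rw [List.map_cons] at hnd
    have hout : p.1 ∉ t.map Prod.fst := (List.nodup_cons.mp hnd).1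
    have hnd' : (t.map Prod.fst).Nodup := (List.nodup_cons.mp hnd).2
    have hfresh' : ∀ q ∈ t, (insAdd e p).contains q.1 = false := by
      intro q hq
      unfold insAdd
      rw [PySem.Dict.contains_insert]
      have h1 : (q.1 == p.1) = false := by
        have hne : q.1 ≠ p.1 := fun h => hout (by rw [← h]; exact List.mem_map_of_mem hq)
        simpa using hne
      rw [h1, hfresh q (List.mem_cons_of_mem _ hq)]
      rfl
    rw [List.foldl_cons, ih (insAdd e p) hnd' hfresh' k]
    have hmkc : (PySem.Dict.mk (p :: t)).contains k = ((p.1 == k) || (PySem.Dict.mk t).contains k) := by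
      simp [PySem.Dict.contains_mk]
    have hmkg : (PySem.Dict.mk (p :: t)).get? k
        = if (p.1 == k) = true then some p.2 else (PySem.Dict.mk t).get? k :=
      PySem.Dict.get?_mk_cons p.1 p.2 t k
    by_cases hk : k = p.1
    · have hbeq : (p.1 == k) = true := by simp [hk]
      have hnc : (PySem.Dict.mk t).contains k = false := by
        rw [PySem.Dict.contains_mk]
        simp only [List.any_eq_false]
        intro q hq h
        have hqk : q.1 = k := by simpa using h
        exact hout (by rw [← hk, ← hqk]; exact List.mem_map_of_mem hq)
      have hg2 : (insAdd e p).getD k 0 = 0 + p.2 := by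
        unfold insAdd
        rw [hk, PySem.Dict.getD_of_not_contains e 0 (hfresh p (List.mem_cons_self ..)),
          PySem.Dict.getD_insert_self]
      have hg3 : (PySem.Dict.mk (p :: t)).getD k 0 = p.2 := by
        rw [PySem.Dict.getD_eq_get?_getD, hmkg, if_pos hbeq]
        rfl
      rw [hnc]
      simp only [Bool.false_eq_true, if_false]
      rw [hg2, hmkc, hbeq, hg3]
      simp
    · have hbeq : (p.1 == k) = false :=
        beq_eq_false_iff_ne.mpr (fun h => hk h.symm)
      have hg1 : (insAdd e p).getD k 0 = e.getD k 0 := by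
        unfold insAdd
        rw [PySem.Dict.getD_insert]
        simp [hk]
      have hgc : (PySem.Dict.mk (p :: t)).getD k 0 = (PySem.Dict.mk t).getD k 0 := by
        rw [PySem.Dict.getD_eq_get?_getD, PySem.Dict.getD_eq_get?_getD, hmkg, hbeq]
        simp
      rw [hg1, hmkc, hbeq, hgc, Bool.false_or]

theorem init_keys (m : List (Int × Int)) (hnd : (m.map Prod.fst).Nodup) :
    (m.foldl insAdd (PySem.Dict.empty : PySem.Dict Int Int)).keys = m.map Prod.fst := by
  have h : (m.foldl insAdd (PySem.Dict.empty : PySem.Dict Int Int)).keys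
      = PySem.Set.update (PySem.Dict.empty : PySem.Dict Int Int).keys (m.map Prod.fst) := by
    exact PySem.Dict.keys_foldl_insert_key m Prod.fst (fun d q => d.getD q.1 0 + q.2) PySem.Dict.empty
  rw [h]
  simp only [PySem.Dict.keys_empty]
  rw [PySem.Set.update_nil_left]
  exact PySem.Set.ofList_eq_self_of_nodup _ hnd

-- ===== VERDICT (by name: the statement is the Claim_ definition above) =====
theorem blink_list_2_spec : Claim_equal_blink_list_2 := by
  intro m blinks _ hpre
  obtain ⟨hnd, -⟩ := hpre
  unfold Spec_blink_list_2
  rw [a_side]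
  unfold blink_list_2_alt
  simp only []
  set target := max blinks 0 with htarget
  have htn : target.toNat = blinks.toNat := by omega
  set r := target.toNat with hr
  have hrt : ((0 : Int)) + (r : Int) = target := by
    simp [hr]
    omega
  -- the initial fold is a gstep fold at level 0
  have hinit : m.foldl (fun st p => altBump st (p.1, 0) p.2)
      ((PySem.Dict.empty : PySem.Dict (Int × Int) Int), ([] : List (Int × Int)))
      = m.foldl (gstep 0) (PySem.Dict.empty, []) := rfl
  obtain ⟨Δ₀, cnt₀, i1, i2, i3, i4, i5⟩ :=
    pairs_sim 0 m (PySem.Dict.empty : PySem.Dict (Int × Int) Int) [] (PySem.Dict.empty : PySem.Dict Int Int) (by simp) (by simp)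
  have hΔ₀ : Δ₀ = m.map Prod.fst := by
    have := i2
    rw [init_keys m hnd] at this
    simpa [PySem.Dict.keys_empty] using this.symm
  -- invariants for levels_run at level 0, with d = Dict.mk m
  have hkeysmk : (PySem.Dict.mk m).keys.Nodup := by
    simpa [PySem.Dict.keys_mk] using hnd
  have hvals0 : ∀ k : Int, cnt₀.getD (k, 0) 0 = (PySem.Dict.mk m).getD k 0 := by
    intro k
    rw [i4, init_getD m (PySem.Dict.empty : PySem.Dict Int Int) hnd (by intro p _; simp) k]
    by_cases hc : (PySem.Dict.mk m).contains k
    · rw [if_pos hc]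
    · rw [if_neg hc,
        PySem.Dict.getD_of_not_contains (PySem.Dict.mk m) 0 (Bool.eq_false_iff.mpr hc)]
      simp
  have hfresh0 : ∀ (k : Int) (j : Int), (0 : Int) < j → cnt₀.contains (k, j) = false := by
    intro k j hj
    have := (i5 (k, j) (by intro h; simp at h; omega)).2
    rw [this]
    simp
  have horder : Δ₀.map (fun k => (k, (0 : Int))) = (PySem.Dict.mk m).items.map (fun p => (p.1, (0 : Int))) := by
    rw [hΔ₀]
    simp [List.map_map]
  -- fuel is sufficient
  have hfuel : remN r (PySem.Dict.mk m) ≤ m.length * 2 ^ (r + 1) + 1 := by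
    have h1 := remN_le r (PySem.Dict.mk m)
    have h2 : (PySem.Dict.mk m).items.length = m.length := rfl
    rw [h2] at h1
    have h3 : m.length * (2 ^ (r + 1) - 1) ≤ m.length * 2 ^ (r + 1) :=
      Nat.mul_le_mul_left _ (Nat.sub_le _ _)
    have h4 : remN r (PySem.Dict.mk m) ≤ m.length * 2 ^ (r + 1) := le_trans h1 h3
    omega
  obtain ⟨fuel', hfuel'⟩ : ∃ f, m.length * 2 ^ (r + 1) + 1 = remN r (PySem.Dict.mk m) + f :=
    ⟨m.length * 2 ^ (r + 1) + 1 - remN r (PySem.Dict.mk m), by omega⟩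
  obtain ⟨cnt', l1, l2⟩ := levels_run target r 0 (PySem.Dict.mk m) cnt₀ [] fuel' hrt hvals0 hfresh0 hkeysmk
  -- assemble
  rw [hinit, i1, hfuel']
  simp only [List.nil_append]
  rw [horder, l1]
  simp only [List.nil_append, List.map_map]
  have hmapeq : (dIter r (PySem.Dict.mk m)).items.map
      ((fun s => (s, cnt'.getD (s, target) 0)) ∘ (fun (p : Int × Int) => p.1))
      = (dIter r (PySem.Dict.mk m)).items := by
    apply List.map_congr_left ?_ |>.trans (List.map_id _)
    intro q hq
    simp only [Function.comp_def, id]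
    have h1 : cnt'.getD (q.1, target) 0 = (dIter r (PySem.Dict.mk m)).getD q.1 0 := l2 q.1
    have h2 : (dIter r (PySem.Dict.mk m)).getD q.1 0 = q.2 := by
      apply PySem.Dict.getD_of_mem_items _ (by exact (by rwa [show (q.1, q.2) = q by rfl]))
        (dIter_nodup r _ hkeysmk)
    rw [h1, h2]
  rw [hmapeq]
  have hrfin : r = blinks.toNat := htn
  rw [hrfin]
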